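-- pv_equiv track=rewrite | github.com/project-katalyst/cmd09-be | scrapping.py | clean_pages
-- ===== SOURCE A (Python) =====
-- def common_prefix(strings: list[str]) -> str:
--     if not strings:
--         return ""
--
--     prefix = strings[0]
--     for s in strings[1:]:
--         while not s.startswith(prefix):
--             prefix = prefix[:-1]
--             if not prefix:
--                 return ""
--     return prefix
--
-- def common_suffix(strings: list[str]) -> str:
--     if not strings:
--         return ""
--
--     suffix = strings[0]
--     for s in strings[1:]:
--         while not s.endswith(suffix):
--             suffix = suffix[1:]
--             if not suffix:
--                 return ""
--     return suffix
--
-- def clean_pages(pages_content: dict) -> dict[str, str]: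
--     if len(pages_content) == 0:
--         return {' ': ' '}
--     prefix = common_prefix(list(pages_content.values()))
--     suffix = common_suffix(list(pages_content.values()))
--     for link, content in pages_content.items():
--         pages_content[link] = content[len(prefix): len(content) - len(suffix)]
--     pages_content[list(pages_content.keys())[0]] = prefix + \
--         pages_content[list(pages_content.keys())[0]] + suffix
--
--     return pages_content
-- ===== SOURCE B (Python) =====
-- def clean_pages(pages_content: dict) -> dict[str, str]:
--     if len(pages_content) == 0:
--         return {' ': ' '}
--     values = list(pages_content.values())
--     # longest common prefix: column-wise scan over zip(*values)
--     pre_chars = []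
--     for col in zip(*values):
--         if all(c == col[0] for c in col):
--             pre_chars.append(col[0])
--         else:
--             break
--     prefix = "".join(pre_chars)
--     # longest common suffix: same column scan on the reversed strings
--     suf_chars = []
--     for col in zip(*[v[::-1] for v in values]):
--         if all(c == col[0] for c in col):
--             suf_chars.append(col[0])
--         else:
--             break
--     suffix = "".join(suf_chars)[::-1]
--     for link, content in pages_content.items():
--         pages_content[link] = content[len(prefix): len(content) - len(suffix)]
--     first = next(iter(pages_content))
--     pages_content[first] = prefix + pages_content[first] + suffix
--     return pages_content
-- ===== Notes on version B (the rewrite author's own statement) =====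
-- stated objective: alternative
-- what changed: The common prefix and suffix are computed by a single column-wise scan over zip(*values) (and over the reversed values) instead of A's repeated startswith/endswith candidate-shrinking loops; the stripping and first-key reattachment stay the same, and B mutates the dict in place as A does.
import Mathlib
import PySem

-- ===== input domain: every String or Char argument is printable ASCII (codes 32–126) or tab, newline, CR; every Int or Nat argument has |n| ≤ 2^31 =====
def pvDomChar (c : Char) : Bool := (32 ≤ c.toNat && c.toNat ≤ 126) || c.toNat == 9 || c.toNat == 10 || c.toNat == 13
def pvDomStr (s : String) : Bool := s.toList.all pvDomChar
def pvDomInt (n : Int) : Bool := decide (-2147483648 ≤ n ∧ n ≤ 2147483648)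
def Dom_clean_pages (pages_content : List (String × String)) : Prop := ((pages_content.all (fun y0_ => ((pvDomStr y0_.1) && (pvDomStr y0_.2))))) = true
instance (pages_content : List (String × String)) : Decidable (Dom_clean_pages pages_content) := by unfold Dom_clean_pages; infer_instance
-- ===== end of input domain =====

-- B replaces A's candidate-shrinking common_prefix/common_suffix with a single column-wise
-- scan (zip(*values)); the stripping/reattach loop is unchanged. Objective: alternative.
-- Both Pythons mutate the dict in place and return that same object; the equivalence is
-- about the returned association list (distinct keys, as a Python dict guarantees; the
-- reattach therefore updates the first entry).

-- ===== PORT A =====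
-- while not s.startswith(prefix): prefix = prefix[:-1]; if not prefix: return ""
-- (the early `return ""` is modelled by reaching []: [] is a prefix of everything, so the
-- fold keeps [] unchanged afterwards, exactly as Python's returned "" would be)
def shrinkA (p s : List Char) : List Char :=
  if p.isPrefixOf s then p
  else if p.dropLast = [] then []
  else shrinkA p.dropLast s
termination_by p.length
decreasing_by
  have hp : p ≠ [] := by rintro rfl; simp at *
  simpa [List.length_dropLast] using Nat.sub_lt (List.length_pos_iff.mpr hp) one_pos

def common_prefix (strings : List String) : String :=
  match strings with
  | [] => ""
  | v :: rest => String.ofList (rest.foldl (fun p s => shrinkA p s.toList) v.toList)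

-- while not s.endswith(suffix): suffix = suffix[1:]; if not suffix: return ""
def shrinkS (p s : List Char) : List Char :=
  if p.isSuffixOf s then p
  else
    match p with
    | [] => []
    | _ :: p' => shrinkS p' s

def common_suffix (strings : List String) : String :=
  match strings with
  | [] => ""
  | v :: rest => String.ofList (rest.foldl (fun p s => shrinkS p s.toList) v.toList)

def clean_pages (pages_content : List (String × String)) : List (String × String) :=
  if pages_content.length = 0 then [(" ", " ")]
  else
    let pre := (common_prefix (pages_content.map (·.2))).toList
    let suf := (common_suffix (pages_content.map (·.2))).toList
    -- pages_content[link] = content[len(prefix): len(content) - len(suffix)]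
    let stripped := pages_content.map (fun kv =>
      (kv.1, String.ofList (PySem.List.slice kv.2.toList (some (pre.length : Int))
                          (some ((kv.2.toList.length : Int) - (suf.length : Int))))))
    -- pages_content[list(pages_content.keys())[0]] = prefix + … + suffix (first entry)
    match stripped with
    | [] => [(" ", " ")]
    | (k0, v0) :: rest => (k0, String.ofList (pre ++ v0.toList ++ suf)) :: rest

-- ===== PORT B =====
-- for col in zip(*values): keep col[0] while all chars of the column equal col[0]
-- (a column exists iff every string still has a character; `s.head? = some c`
-- is exactly "s nonempty and its next char equals the first string's char")
def colScan (v0 : List Char) (rest : List (List Char)) : List Char :=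
  match v0 with
  | [] => []
  | c :: v0' =>
    if rest.all (fun s => s.head? = some c) then c :: colScan v0' (rest.map List.tail)
    else []

def lcpCols (values : List (List Char)) : List Char :=
  match values with
  | [] => []
  | v :: vs => colScan v vs

def clean_pages_alt (pages_content : List (String × String)) : List (String × String) :=
  if pages_content.length = 0 then [(" ", " ")]
  else
    let pre := lcpCols (pages_content.map (fun kv => kv.2.toList))
    -- suffix = the same column scan on the reversed strings, reversed back
    let suf := (lcpCols (pages_content.map (fun kv => kv.2.toList.reverse))).reverse
    let stripped := pages_content.map (fun kv =>
      (kv.1, String.ofList (PySem.List.slice kv.2.toList (some (pre.length : Int))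
                          (some ((kv.2.toList.length : Int) - (suf.length : Int))))))
    match stripped with
    | [] => [(" ", " ")]
    | (k0, v0) :: rest => (k0, String.ofList (pre ++ v0.toList ++ suf)) :: rest

-- ===== PRECONDITION & SPEC =====
def Spec_clean_pages (pages_content : List (String × String)) (out : List (String × String)) : Prop := out = clean_pages_alt pages_content
instance (pages_content : List (String × String)) (out : List (String × String)) : Decidable (Spec_clean_pages pages_content out) := by unfold Spec_clean_pages; infer_instance

-- ===== CLAIM (what is proved, stated in full; the proofs are below) =====
def Claim_equal_clean_pages : Prop := ∀ (pages_content : List (String × String)), Dom_clean_pages pages_content → Spec_clean_pages pages_content (clean_pages pages_content)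

-- ===== LEMMAS AND PROOFS =====

-- r is THE longest common prefix (resp. suffix) of the lists in ss
def isLCP (ss : List (List Char)) (r : List Char) : Prop :=
  (∀ s ∈ ss, r <+: s) ∧ ∀ q, (∀ s ∈ ss, q <+: s) → q <+: r
def isLCS (ss : List (List Char)) (r : List Char) : Prop :=
  (∀ s ∈ ss, r <:+ s) ∧ ∀ q, (∀ s ∈ ss, q <:+ s) → q <:+ r

theorem lcp_unique {ss : List (List Char)} {r₁ r₂ : List Char}
    (h₁ : isLCP ss r₁) (h₂ : isLCP ss r₂) : r₁ = r₂ := by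
  have a : r₁ <+: r₂ := h₂.2 _ h₁.1
  have b : r₂ <+: r₁ := h₁.2 _ h₂.1
  exact a.eq_of_length (le_antisymm a.length_le b.length_le)

theorem lcs_unique {ss : List (List Char)} {r₁ r₂ : List Char}
    (h₁ : isLCS ss r₁) (h₂ : isLCS ss r₂) : r₁ = r₂ := by
  have a : r₁ <:+ r₂ := h₂.2 _ h₁.1
  have b : r₂ <:+ r₁ := h₁.2 _ h₂.1
  exact a.eq_of_length (le_antisymm a.length_le b.length_le)

theorem prefix_dropLast {q p : List Char} (h : q <+: p) (hne : q ≠ p) : q <+: p.dropLast := by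
  obtain ⟨t, rfl⟩ := h
  have ht : t ≠ [] := by rintro rfl; simp at hne
  rw [List.dropLast_append_of_ne_nil ht]
  exact List.prefix_append _ _

theorem shrinkA_prefix_left (p s : List Char) : shrinkA p s <+: p := by
  fun_induction shrinkA p s with
  | case1 p h => exact List.prefix_rfl
  | case2 p h1 h2 => exact List.nil_prefix
  | case3 p h1 h2 ih => exact ih.trans (List.dropLast_prefix p)

theorem shrinkA_prefix_right (p s : List Char) : shrinkA p s <+: s := by
  fun_induction shrinkA p s with
  | case1 p h => exact List.isPrefixOf_iff_prefix.mp h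
  | case2 p h1 h2 => exact List.nil_prefix
  | case3 p h1 h2 ih => exact ih

theorem shrinkA_max {q : List Char} (p s : List Char) (hq : q <+: p) (hs : q <+: s) :
    q <+: shrinkA p s := by
  fun_induction shrinkA p s with
  | case1 p h => exact hq
  | case2 p h1 h2 =>
    have hne : q ≠ p := by rintro rfl; exact h1 (List.isPrefixOf_iff_prefix.mpr hs)
    have h3 := prefix_dropLast hq hne
    rw [h2] at h3
    simpa using h3
  | case3 p h1 h2 ih =>
    have hne : q ≠ p := by rintro rfl; exact h1 (List.isPrefixOf_iff_prefix.mpr hs)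
    exact ih (prefix_dropLast hq hne)

theorem shrinkS_suffix_left (p s : List Char) : shrinkS p s <:+ p := by
  fun_induction shrinkS p s with
  | case1 p h => exact List.suffix_rfl
  | case2 h => exact List.nil_suffix
  | case3 c p2 h ih => exact ih.trans (List.suffix_cons c p2)

theorem shrinkS_suffix_right (p s : List Char) : shrinkS p s <:+ s := by
  fun_induction shrinkS p s with
  | case1 p h => exact List.isSuffixOf_iff_suffix.mp h
  | case2 h => exact List.nil_suffix
  | case3 c p2 h ih => exact ih

theorem shrinkS_max {q : List Char} (p s : List Char) (hq : q <:+ p) (hs : q <:+ s) :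
    q <:+ shrinkS p s := by
  fun_induction shrinkS p s with
  | case1 p h => exact hq
  | case2 h => simpa using hq
  | case3 c p2 h ih =>
    rcases List.suffix_cons_iff.mp hq with rfl | hq2
    · exact absurd (List.isSuffixOf_iff_suffix.mpr hs) h
    · exact ih hq2

theorem foldl_shrinkA_isLCP (rest : List (List Char)) (v : List Char) :
    isLCP (v :: rest) (rest.foldl shrinkA v) := by
  induction rest generalizing v with
  | nil => exact ⟨by simp, fun q hq => hq v (by simp)⟩
  | cons s t ih =>
    obtain ⟨P, M⟩ := ih (shrinkA v s)
    refine ⟨?_, ?_⟩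
    · intro x hx
      have hhead := P _ (List.mem_cons_self ..)
      rcases List.mem_cons.mp hx with rfl | hx
      · exact hhead.trans (shrinkA_prefix_left _ _)
      rcases List.mem_cons.mp hx with rfl | hx
      · exact hhead.trans (shrinkA_prefix_right _ _)
      · exact P _ (List.mem_cons_of_mem _ hx)
    · intro q hq
      refine M q ?_
      intro x hx
      rcases List.mem_cons.mp hx with rfl | hx
      · exact shrinkA_max _ _ (hq _ (by simp)) (hq _ (by simp))
      · exact hq x (by simp [hx])

theorem foldl_shrinkS_isLCS (rest : List (List Char)) (v : List Char) :
    isLCS (v :: rest) (rest.foldl shrinkS v) := by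
  induction rest generalizing v with
  | nil => exact ⟨by simp, fun q hq => hq v (by simp)⟩
  | cons s t ih =>
    obtain ⟨P, M⟩ := ih (shrinkS v s)
    refine ⟨?_, ?_⟩
    · intro x hx
      have hhead := P _ (List.mem_cons_self ..)
      rcases List.mem_cons.mp hx with rfl | hx
      · exact hhead.trans (shrinkS_suffix_left _ _)
      rcases List.mem_cons.mp hx with rfl | hx
      · exact hhead.trans (shrinkS_suffix_right _ _)
      · exact P _ (List.mem_cons_of_mem _ hx)
    · intro q hq
      refine M q ?_
      intro x hx
      rcases List.mem_cons.mp hx with rfl | hx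
      · exact shrinkS_max _ _ (hq _ (by simp)) (hq _ (by simp))
      · exact hq x (by simp [hx])

theorem colScan_isLCP (v : List Char) (rest : List (List Char)) :
    isLCP (v :: rest) (colScan v rest) := by
  induction v generalizing rest with
  | nil =>
    refine ⟨fun s _ => List.nil_prefix, ?_⟩
    intro q hq
    have h0 := hq [] (by simp)
    simpa [colScan] using h0
  | cons c v' ih =>
    by_cases hall : rest.all (fun s => s.head? = some c)
    · have hshape : ∀ s ∈ rest, s = c :: s.tail := by
        intro s hs
        have h1 := List.all_eq_true.mp hall s hs
        cases s with
        | nil => simp at h1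
        | cons a t => simp at h1; simp [h1]
      obtain ⟨P, M⟩ := ih (rest.map List.tail)
      rw [colScan, if_pos hall]
      refine ⟨?_, ?_⟩
      · intro s hs
        rcases List.mem_cons.mp hs with rfl | hs
        · exact List.cons_prefix_cons.mpr ⟨rfl, P _ (by simp)⟩
        · rw [hshape s hs]
          refine List.cons_prefix_cons.mpr ⟨rfl, P _ ?_⟩
          simp only [List.mem_cons, List.mem_map]
          exact Or.inr ⟨s, hs, rfl⟩
      · intro q hq
        cases q with
        | nil => exact List.nil_prefix
        | cons d q' =>
          obtain ⟨rfl, hqv⟩ := List.cons_prefix_cons.mp (hq (c :: v') (by simp))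
          refine List.cons_prefix_cons.mpr ⟨rfl, M q' ?_⟩
          intro x hx
          rcases List.mem_cons.mp hx with rfl | hx
          · exact hqv
          · obtain ⟨s, hs, rfl⟩ := List.mem_map.mp hx
            have h2 := hq s (by simp [hs])
            rw [hshape s hs] at h2
            exact (List.cons_prefix_cons.mp h2).2
    · rw [colScan, if_neg hall]
      refine ⟨fun s _ => List.nil_prefix, ?_⟩
      intro q hq
      cases q with
      | nil => exact List.prefix_rfl
      | cons d q' =>
        exfalso
        obtain ⟨rfl, _⟩ := List.cons_prefix_cons.mp (hq (c :: v') (by simp))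
        obtain ⟨s, hs, hne⟩ : ∃ s ∈ rest, ¬ s.head? = some d := by
          simpa using hall
        have h2 := hq s (by simp [hs])
        cases s with
        | nil => simp at h2
        | cons a t =>
          obtain ⟨rfl, _⟩ := List.cons_prefix_cons.mp h2
          simp at hne

theorem isLCP_reverse {ss : List (List Char)} {r : List Char}
    (h : isLCP (ss.map List.reverse) r) : isLCS ss r.reverse := by
  obtain ⟨P, M⟩ := h
  refine ⟨?_, ?_⟩
  · intro s hs
    have h1 := P s.reverse (List.mem_map_of_mem hs)
    have h2 : r.reverse.reverse <+: s.reverse := by simpa using h1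
    simpa using List.reverse_prefix.mp h2
  · intro q hq
    have h1 : q.reverse <+: r := by
      refine M q.reverse ?_
      intro x hx
      obtain ⟨s, hs, rfl⟩ := List.mem_map.mp hx
      exact List.reverse_prefix.mpr (hq s hs)
    have h2 : q.reverse.reverse <:+ r.reverse := List.reverse_prefix.mp (by simpa using h1)
    simpa using h2

theorem prefix_eq (v : List Char) (rest : List (List Char)) :
    rest.foldl shrinkA v = colScan v rest :=
  lcp_unique (foldl_shrinkA_isLCP rest v) (colScan_isLCP v rest)

theorem suffix_eq (v : List Char) (rest : List (List Char)) :
    rest.foldl shrinkS v = (colScan v.reverse (rest.map List.reverse)).reverse := by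
  refine lcs_unique (foldl_shrinkS_isLCS rest v) (isLCP_reverse ?_)
  simpa using colScan_isLCP v.reverse (rest.map List.reverse)

-- ===== VERDICT (by name: the statement is the Claim_ definition above) =====
theorem clean_pages_spec : Claim_equal_clean_pages := by
  intro pc _
  unfold Spec_clean_pages
  cases pc with
  | nil => rfl
  | cons kv rest =>
    have hpre : (common_prefix ((kv :: rest).map (·.2))).toList
        = lcpCols ((kv :: rest).map (fun kv => kv.2.toList)) := by
      simp only [List.map_cons, common_prefix, lcpCols, String.toList_ofList,
        ← List.foldl_map, List.map_map]
      exact prefix_eq _ _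
    have hsuf : (common_suffix ((kv :: rest).map (·.2))).toList
        = (lcpCols ((kv :: rest).map (fun kv => kv.2.toList.reverse))).reverse := by
      simp only [List.map_cons, common_suffix, lcpCols, String.toList_ofList,
        ← List.foldl_map, List.map_map]
      have h1 := suffix_eq kv.2.toList (rest.map (String.toList ∘ fun x => x.2))
      simpa [List.map_map, Function.comp] using h1
    simp only [clean_pages, clean_pages_alt, hpre, hsuf]
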